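-- pv_equiv track=rewrite | github.com/martibook/CodeForces | 472-A.py | findq
-- ===== SOURCE A (Python) =====
-- def findq(s, i):
--     start = s.find('?', i)
--     if start != -1:
--         stop = start
--         while stop < len(s) and s[stop] == '?':
--             stop += 1
--         return start, stop - start
--     else:
--         return None, None
-- ===== SOURCE B (Python) =====
-- def findq(s, i):
--     # Run-length scan: walk the maximal runs of equal characters from the left
--     # and return the first '?'-run that extends past the (Python-find-style
--     # clamped) start index.
--     n = len(s)
--     j = i + n if i < 0 else i
--     if j < 0:
--         j = 0
--     pos = 0
--     while pos < n:
--         end = pos + 1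
--         while end < n and s[end] == s[pos]:
--             end += 1
--         if s[pos] == '?' and end > j:
--             start = pos if pos > j else j
--             return start, end - start
--         pos = end
--     return None, None
-- ===== Notes on version B (the rewrite author's own statement) =====
-- stated objective: alternative
-- what changed: A does find('?', i) and then counts the run forward from the hit; B never calls find: it run-length-scans the string from position 0, computing each maximal run of equal characters, and returns the clamped intersection of the first '?'-run that extends past the start index.
import Mathlib
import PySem

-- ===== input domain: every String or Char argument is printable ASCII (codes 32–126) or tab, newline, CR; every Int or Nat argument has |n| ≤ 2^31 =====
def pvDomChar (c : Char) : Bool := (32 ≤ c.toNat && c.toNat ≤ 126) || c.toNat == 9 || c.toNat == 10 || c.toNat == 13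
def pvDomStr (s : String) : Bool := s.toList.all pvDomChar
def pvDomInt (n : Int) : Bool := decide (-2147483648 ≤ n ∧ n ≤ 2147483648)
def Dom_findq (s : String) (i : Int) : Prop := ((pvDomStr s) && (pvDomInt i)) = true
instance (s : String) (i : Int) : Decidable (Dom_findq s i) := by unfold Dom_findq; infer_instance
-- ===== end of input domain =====

-- B replaces A's find-then-count with a left-to-right run-length scan over the maximal
-- runs of equal characters (alternative decomposition, same cost); same value everywhere.

-- ===== PORT A =====
-- the 'while stop < len(s) and s[stop] == "?"' loop of A
def findqLoop (cs : List Char) (stop : Nat) : Nat :=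
  if h : stop < cs.length then
    if cs[stop] = '?' then findqLoop cs (stop + 1) else stop
  else stop
termination_by cs.length - stop

def findq (s : String) (i : Int) : Option Int × Option Int :=
  let start := PySem.Str.findFrom s "?" i none
  if start ≠ -1 then
    let stop := findqLoop s.toList start.toNat
    (some start, some ((stop : Int) - start))
  else (none, none)

-- ===== PORT B =====
-- the inner 'while end < n and s[end] == s[pos]' loop of B
-- (pos is always in range at the call sites; s[pos] ported with getD)
def grpEnd (cs : List Char) (pos : Nat) (e : Nat) : Nat :=
  if h : e < cs.length then
    if cs[e] = cs.getD pos ' ' then grpEnd cs pos (e + 1) else e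
  else e
termination_by cs.length - e

-- needed by scanGroups for termination
lemma grpEnd_ge (cs : List Char) (pos : Nat) (e : Nat) : e ≤ grpEnd cs pos e := by
  fun_induction grpEnd cs pos e with
  | case1 e h hq ih => omega
  | case2 e h hq => omega
  | case3 e h => omega

-- the outer 'while pos < n' loop of B
def scanGroups (cs : List Char) (j : Nat) (pos : Nat) : Option Int × Option Int :=
  if h : pos < cs.length then
    let e := grpEnd cs pos (pos + 1)
    if cs[pos] = '?' ∧ j < e then
      let start := if j < pos then pos else j
      (some (start : Int), some ((e : Int) - (start : Int)))
    else scanGroups cs j e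
  else (none, none)
termination_by cs.length - pos
decreasing_by have := grpEnd_ge cs pos (pos + 1); omega

def findq_alt (s : String) (i : Int) : Option Int × Option Int :=
  let n : Int := PySem.Str.len s
  let j0 : Int := if i < 0 then i + n else i
  let j : Int := if j0 < 0 then 0 else j0
  scanGroups s.toList j.toNat 0

-- ===== PRECONDITION & SPEC =====
def Spec_findq (s : String) (i : Int) (out : Option Int × Option Int) : Prop := out = findq_alt s i
instance (s : String) (i : Int) (out : Option Int × Option Int) : Decidable (Spec_findq s i out) := by unfold Spec_findq; infer_instance

-- ===== CLAIM (what is proved, stated in full; the proofs are below) =====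
def Claim_equal_findq : Prop := ∀ (s : String) (i : Int), Dom_findq s i → Spec_findq s i (findq s i)

-- ===== LEMMAS AND PROOFS =====

-- A's result, written over the character list with the clamped start index k = min j n
def aTail (cs : List Char) (j : Nat) : Option Int × Option Int :=
  let k := min j cs.length
  let a := PySem.Chars.find (cs.drop k) ['?']
  if a = -1 then (none, none)
  else (some ((k : Int) + a), some ((findqLoop cs (k + a.toNat) : Int) - ((k : Int) + a)))

-- spec lemmas for A's counting loop
lemma findqLoop_le (cs : List Char) (e : Nat) (h : e ≤ cs.length) : findqLoop cs e ≤ cs.length := by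
  fun_induction findqLoop cs e with
  | case1 e h hq ih => exact ih (by omega)
  | case2 e h hq => omega
  | case3 e h => omega

lemma findqLoop_ge (cs : List Char) (e : Nat) : e ≤ findqLoop cs e := by
  fun_induction findqLoop cs e with
  | case1 e h hq ih => omega
  | case2 e h hq => omega
  | case3 e h => omega

lemma findqLoop_mem (cs : List Char) (e : Nat) :
    ∀ x, e ≤ x → x < findqLoop cs e → ∀ (hx : x < cs.length), cs[x] = '?' := by
  fun_induction findqLoop cs e with
  | case1 e h hq ih =>
    intro x hx1 hx2 hx3
    rcases Nat.eq_or_lt_of_le hx1 with rfl | hlt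
    · exact hq
    · exact ih x hlt hx2 hx3
  | case2 e h hq => intro x hx1 hx2 _; omega
  | case3 e h => intro x hx1 hx2 _; omega

lemma findqLoop_stop (cs : List Char) (e : Nat) (h : findqLoop cs e < cs.length) :
    cs[findqLoop cs e] ≠ '?' := by
  fun_induction findqLoop cs e with
  | case1 e h0 hq ih => exact ih h
  | case2 e h0 hq => exact hq
  | case3 e h0 => omega

-- spec lemmas for B's inner run loop
lemma grpEnd_le (cs : List Char) (pos e : Nat) (h : e ≤ cs.length) :
    grpEnd cs pos e ≤ cs.length := by
  fun_induction grpEnd cs pos e with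
  | case1 e h hq ih => exact ih (by omega)
  | case2 e h hq => omega
  | case3 e h => omega

lemma grpEnd_mem (cs : List Char) (pos e : Nat) :
    ∀ x, e ≤ x → x < grpEnd cs pos e → ∀ (hx : x < cs.length), cs[x] = cs.getD pos ' ' := by
  fun_induction grpEnd cs pos e with
  | case1 e h hq ih =>
    intro x hx1 hx2 hx3
    rcases Nat.eq_or_lt_of_le hx1 with rfl | hlt
    · exact hq
    · exact ih x hlt hx2 hx3
  | case2 e h hq => intro x hx1 hx2 _; omega
  | case3 e h => intro x hx1 hx2 _; omega

lemma grpEnd_stop (cs : List Char) (pos e : Nat) (h : grpEnd cs pos e < cs.length) :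
    cs[grpEnd cs pos e] ≠ cs.getD pos ' ' := by
  fun_induction grpEnd cs pos e with
  | case1 e h0 hq ih => exact ih h
  | case2 e h0 hq => exact hq
  | case3 e h0 => omega

-- [c] is a prefix of cs.drop m iff cs[m] = c
lemma singleton_prefix_drop (cs : List Char) (m : Nat) (c : Char) :
    ([c] <+: cs.drop m) ↔ ∃ h : m < cs.length, cs[m] = c := by
  constructor
  · rintro ⟨t, ht⟩
    have hm : m < cs.length := by
      by_contra h
      rw [List.drop_eq_nil_of_le (by omega)] at ht
      simp at ht
    refine ⟨hm, ?_⟩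
    have := congrArg (fun l => l[0]?) ht
    simp [List.getElem?_drop] at this
    rw [List.getElem?_eq_getElem hm] at this
    exact (Option.some.inj this).symm
  · rintro ⟨hm, hc⟩
    refine ⟨cs.drop (m+1), ?_⟩
    rw [← hc]
    rw [List.drop_eq_getElem_cons hm]
    simp

-- '?' occurs at index m ≥ k in cs  →  find (cs.drop k) ['?'] ≠ -1
lemma find_drop_ne (cs : List Char) (k m : Nat) (hk : k ≤ m) (hm : m < cs.length)
    (hc : cs[m] = '?') : PySem.Chars.find (cs.drop k) ['?'] ≠ -1 := by
  rw [PySem.Chars.find_ne_neg_one_iff, ← PySem.Chars.isIn_iff_infix,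
    ← PySem.Chars.exists_prefix_drop_iff_isIn]
  refine ⟨m - k, ?_⟩
  rw [List.drop_drop, singleton_prefix_drop]
  exact ⟨by omega, by simp only [show k + (m - k) = m from by omega]; exact hc⟩

-- the outer scan, from any position whose skipped prefix holds no '?' at index ≥ j,
-- computes A's value
lemma scan_eq (cs : List Char) (j : Nat) (pos : Nat)
    (inv : ∀ m, (h : m < cs.length) → m < pos → cs[m] = '?' → m < j) :
    scanGroups cs j pos = aTail cs j := by
  rw [scanGroups]
  by_cases h : pos < cs.length
  · rw [dif_pos h]
    simp only []
    set e := grpEnd cs pos (pos + 1) with he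
    have hpe : pos < e := lt_of_lt_of_le (Nat.lt_succ_self pos) (grpEnd_ge cs pos (pos + 1))
    have hen : e ≤ cs.length := grpEnd_le cs pos (pos + 1) (by omega)
    by_cases hcond : cs[pos] = '?' ∧ j < e
    · rw [if_pos hcond]
      obtain ⟨hq, hje⟩ := hcond
      set start := if j < pos then pos else j with hs
      have hps : pos ≤ start := by rw [hs]; split_ifs <;> omega
      have hjs : j ≤ start := by rw [hs]; split_ifs <;> omega
      have hse : start < e := by rw [hs]; split_ifs <;> omega
      have hsn : start < cs.length := by omega
      have hstart : cs[start] = '?' := by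
        rcases Nat.eq_or_lt_of_le hps with heq | hlt
        · simpa [← heq] using hq
        · have := grpEnd_mem cs pos (pos + 1) start (by omega) (by omega) hsn
          rw [this, List.getD_eq_getElem cs ' ' h, hq]
      -- the first '?' at index ≥ k is exactly start
      unfold aTail
      set k := min j cs.length with hkdef
      have hks : k ≤ start := by omega
      have hne : PySem.Chars.find (cs.drop k) ['?'] ≠ -1 :=
        find_drop_ne cs k start hks hsn hstart
      set a := PySem.Chars.find (cs.drop k) ['?'] with ha
      have ha0 : 0 ≤ a := by
        have := PySem.Chars.neg_one_le_find (cs.drop k) ['?']; omega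
      obtain ⟨hpre, hmin⟩ := PySem.Chars.find_spec (s := cs.drop k) (sub := ['?']) ha0
      rw [← ha] at hpre hmin
      rw [List.drop_drop, singleton_prefix_drop] at hpre
      obtain ⟨hm0n, hm0c⟩ := hpre
      set m0 := k + a.toNat with hm0
      have hm0le : m0 ≤ start := by
        by_contra hcon
        have := hmin (start - k) (by omega)
        rw [List.drop_drop, singleton_prefix_drop] at this
        exact this ⟨by omega, by simp only [show k + (start - k) = start from by omega]; exact hstart⟩
      have hm0ge : start ≤ m0 := by
        by_contra hcon
        push Not at hcon
        by_cases hmp : m0 < pos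
        · have := inv m0 hm0n hmp hm0c
          omega
        · -- pos ≤ m0 < start forces start = j with pos ≤ j, and m0 ≥ k = j
          have : ¬ j < pos := by
            intro hjp
            rw [hs, if_pos hjp] at hcon
            omega
          rw [hs, if_neg this] at hcon
          omega
      have hm0eq : m0 = start := by omega
      -- A's run count from start stops exactly at e
      have hf : findqLoop cs start = e := by
        set f := findqLoop cs start with hfdef
        have hfs : start ≤ f := findqLoop_ge cs start
        have hfn : f ≤ cs.length := findqLoop_le cs start (by omega)
        rcases lt_trichotomy f e with hlt | heq | hgt
        · exfalso
          have hfl : f < cs.length := by omega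
          have hfq : cs[f] ≠ '?' := findqLoop_stop cs start hfl
          rcases Nat.eq_or_lt_of_le (le_trans hps hfs) with heq2 | hlt2
          · exact hfq (by simpa [← heq2] using hq)
          · have := grpEnd_mem cs pos (pos + 1) f (by omega) (by omega) hfl
            rw [List.getD_eq_getElem cs ' ' h, hq] at this
            exact hfq this
        · exact heq
        · exfalso
          have hel : e < cs.length := by omega
          have := findqLoop_mem cs start e (by omega) (by omega) hel
          have hstop := grpEnd_stop cs pos (pos + 1) hel
          rw [List.getD_eq_getElem cs ' ' h, hq] at hstop
          exact hstop this
      rw [if_neg hne]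
      have hka : (k : Int) + a = (start : Int) := by omega
      rw [show k + a.toNat = start from by omega, hf, hka]
    · rw [if_neg hcond]
      refine scan_eq cs j e ?_
      intro m hm hme hmc
      by_cases hmp : m < pos
      · exact inv m hm hmp hmc
      · have : cs[m] = cs[pos] := by
          rcases Nat.eq_or_lt_of_le (Nat.le_of_not_lt hmp) with heq | hlt
          · simp [← heq]
          · have := grpEnd_mem cs pos (pos + 1) m (by omega) (by omega) hm
            rw [this, List.getD_eq_getElem cs ' ' h]
        rw [this] at hmc
        have : ¬ j < e := fun hje => hcond ⟨hmc, hje⟩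
        omega
  · rw [dif_neg h]
    unfold aTail
    have : PySem.Chars.find (cs.drop (min j cs.length)) ['?'] = -1 := by
      rw [PySem.Chars.find_eq_neg_one_iff, ← PySem.Chars.isIn_iff_infix,
        ← PySem.Chars.exists_prefix_drop_iff_isIn]
      rintro ⟨x, hx⟩
      rw [List.drop_drop, singleton_prefix_drop] at hx
      obtain ⟨hm, hc⟩ := hx
      have := inv (min j cs.length + x) hm (by omega) hc
      omega
    simp [this]
termination_by cs.length - pos
decreasing_by have := grpEnd_ge cs pos (pos + 1); omega

-- string-level equality of the two ports
lemma findq_eq_alt (s : String) (i : Int) : findq s i = findq_alt s i := by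
  unfold findq findq_alt
  simp only [PySem.Str.findFrom_eq, PySem.Str.len_eq]
  have hq : ("?" : String).toList = ['?'] := rfl
  rw [hq]
  generalize s.toList = cs
  set n := cs.length with hn
  set j : Int := if (if i < 0 then i + (n : Int) else i) < 0 then 0 else (if i < 0 then i + (n : Int) else i) with hj
  have hj0 : 0 ≤ j := by rw [hj]; split_ifs <;> omega
  set k := PySem.List.clampIdx n i with hk
  have hkmin : k = min j.toNat n := by
    rw [hk, hj]; unfold PySem.List.clampIdx
    split_ifs <;> omega
  have hkn : k ≤ n := by omega
  have hff : PySem.Chars.findFrom cs ['?'] i none =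
      (if PySem.Chars.find (cs.drop k) ['?'] = -1 then (-1 : Int)
       else ((k : Nat) : Int) + PySem.Chars.find (cs.drop k) ['?']) := by
    by_cases h3 : (n : Int) < i
    · have hcn : k = n := by rw [hk]; unfold PySem.List.clampIdx; split_ifs <;> omega
      rw [hcn, List.drop_length, show PySem.Chars.find ([] : List Char) ['?'] = -1 from by decide, if_pos rfl]
      unfold PySem.Chars.findFrom
      simp only []
      rw [if_neg (show ¬ i < 0 from by omega), if_pos (by omega : (cs.length : Int) < i)]
    · rw [← PySem.Chars.findFrom_natCast cs ['?'] _ hkn]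
      unfold PySem.Chars.findFrom
      simp only []
      rw [show (if i < 0 then if i + (cs.length : Int) < 0 then 0 else i + (cs.length : Int) else i)
            = ((k : Nat) : Int) from by rw [hk]; unfold PySem.List.clampIdx; split_ifs <;> omega]
      rw [if_neg (show ¬ ((k : Nat) : Int) < 0 from by omega)]
  rw [scan_eq cs j.toNat 0 (by intro m hm hmp; omega)]
  unfold aTail
  rw [← hkmin, hff]
  by_cases ha : PySem.Chars.find (cs.drop k) ['?'] = -1
  · simp [ha]
  · have ha0 : 0 ≤ PySem.Chars.find (cs.drop k) ['?'] := by
      have := PySem.Chars.neg_one_le_find (cs.drop k) ['?']; omega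
    set a := PySem.Chars.find (cs.drop k) ['?'] with haa
    simp only [← haa, if_neg ha, if_pos (show ((k : Int) + a ≠ -1) from by omega),
      show ((k : Int) + a).toNat = k + a.toNat from by omega]

-- ===== VERDICT (by name: the statement is the Claim_ definition above) =====
theorem findq_spec : Claim_equal_findq := by
  intro s i _
  unfold Spec_findq
  exact findq_eq_alt s i
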